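-- pv_equiv track=rewrite | github.com/MrBrantCode/unitest_baseline | mut_generate/mist_train_cf/cf_88058/solution.py | check_vowels
-- ===== SOURCE A (Python) =====
-- def check_vowels(sentence):
--     vowels = ['a', 'e', 'i', 'o', 'u']
--     consonants = ['b', 'c', 'd', 'f', 'g', 'h', 'j', 'k', 'l', 'm', 'n', 'p', 'q', 'r', 's', 't', 'v', 'w', 'x', 'y', 'z']
--     words = sentence.lower().split()
--
--     for i in range(len(words)):
--         word = words[i]
--         if word[0] in vowels:
--             continue
--         for j in range(1, len(word)):
--             if word[j] in vowels:
--                 if word[j-1] in consonants and word[j-1] != 'y':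
--                     continue
--                 else:
--                     return False
--
--     return True
-- ===== SOURCE B (Python) =====
-- def check_vowels(sentence):
--     # Translate each word into a 3-symbol class alphabet, then search it for
--     # the two forbidden digrams 'VV' and 'XV' instead of scanning index pairs.
--     def classify(word):
--         return ''.join(
--             'V' if c in 'aeiou' else
--             'C' if c in 'bcdfghjklmnpqrstvwxz' else
--             'X'
--             for c in word)
--     for t in map(classify, sentence.lower().split()):
--         if not t.startswith('V') and ('VV' in t or 'XV' in t):
--             return False
--     return True
-- ===== Notes on version B (the rewrite author's own statement) =====
-- stated objective: alternative
-- what changed: B first translates each word into a three-symbol class string (V=vowel, C=safe consonant, X=other incl. 'y') and then decides the word by substring search for the forbidden digrams 'VV'/'XV', instead of A's index loop over j comparing word[j]/word[j-1] against vowel and consonant lists with continue/early-return.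
import Mathlib
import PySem

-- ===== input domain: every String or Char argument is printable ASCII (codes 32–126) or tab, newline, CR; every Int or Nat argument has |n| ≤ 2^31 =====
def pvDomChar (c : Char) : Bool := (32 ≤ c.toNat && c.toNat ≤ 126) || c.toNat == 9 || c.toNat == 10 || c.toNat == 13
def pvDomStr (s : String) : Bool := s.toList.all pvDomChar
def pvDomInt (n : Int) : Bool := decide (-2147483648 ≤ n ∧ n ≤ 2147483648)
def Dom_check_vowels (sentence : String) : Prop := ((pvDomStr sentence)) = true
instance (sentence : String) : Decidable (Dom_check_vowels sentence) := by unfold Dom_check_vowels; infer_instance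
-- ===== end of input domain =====

-- B translates each word into a 3-symbol class string (V = vowel, C = safe consonant, X = other
-- incl. 'y') and searches it for the forbidden digrams "VV"/"XV", instead of A's index loop
-- over j with vowel/consonant list-membership tests; same cost, a different mechanism.

-- ===== PORT A =====
def pvAVowels : List Char := ['a', 'e', 'i', 'o', 'u']
def pvAConsonants : List Char :=
  ['b', 'c', 'd', 'f', 'g', 'h', 'j', 'k', 'l', 'm', 'n', 'p', 'q', 'r', 's', 't', 'v', 'w', 'x', 'y', 'z']

-- inner loop: for j in range(1, len(word)) with early 'return False'
-- (indices j and j-1 are always in range, so pyGetD's default is never read)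
def pvAInner (w : List Char) (j : Nat) : Bool :=
  if j < w.length then
    if (PySem.List.pyGetD w (j : Int) ' ') ∈ pvAVowels then
      if (PySem.List.pyGetD w ((j : Int) - 1) ' ') ∈ pvAConsonants ∧
         (PySem.List.pyGetD w ((j : Int) - 1) ' ') ≠ 'y' then
        pvAInner w (j + 1)
      else
        false
    else
      pvAInner w (j + 1)
  else
    true
termination_by w.length - j

-- outer loop: for i in range(len(words)) with continue / early return
def pvAOuter : List (List Char) → Bool
  | [] => true
  | w :: ws =>
    if (PySem.List.pyGetD w (0 : Int) ' ') ∈ pvAVowels then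
      pvAOuter ws
    else if pvAInner w 1 then
      pvAOuter ws
    else
      false

def check_vowels (sentence : String) : Bool :=
  pvAOuter ((PySem.Str.split₀ (PySem.Str.lower sentence)).map String.toList)

-- ===== PORT B =====
-- the per-character class ('V' if c in 'aeiou' else 'C' if c in 'bcdfghjklmnpqrstvwxz' else 'X')
def pvClassify (c : Char) : Char :=
  if c ∈ ['a', 'e', 'i', 'o', 'u'] then 'V'
  else if c ∈ ['b','c','d','f','g','h','j','k','l','m','n','p','q','r','s','t','v','w','x','z'] then 'C'
  else 'X'

-- 'for t in map(classify, …): if not t.startswith('V') and ('VV' in t or 'XV' in t): return False' / 'return True'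
def pvBLoop : List (List Char) → Bool
  | [] => true
  | t :: ts =>
    if !(PySem.Chars.startswith t ['V']) &&
        (PySem.Chars.isIn ['V', 'V'] t || PySem.Chars.isIn ['X', 'V'] t) then
      false
    else
      pvBLoop ts

def check_vowels_alt (sentence : String) : Bool :=
  pvBLoop (((PySem.Str.split₀ (PySem.Str.lower sentence)).map String.toList).map
    (fun w => w.map pvClassify))

-- ===== PRECONDITION & SPEC =====
def Spec_check_vowels (sentence : String) (out : Bool) : Prop := out = check_vowels_alt sentence
instance (sentence : String) (out : Bool) : Decidable (Spec_check_vowels sentence out) := by unfold Spec_check_vowels; infer_instance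

-- ===== CLAIM (what is proved, stated in full; the proofs are below) =====
def Claim_equal_check_vowels : Prop := ∀ (sentence : String), Dom_check_vowels sentence → Spec_check_vowels sentence (check_vowels sentence)

-- ===== LEMMAS AND PROOFS =====

-- the pairwise condition A's inner loop enforces, as a predicate on an adjacent pair
def pvPairOK (p c : Char) : Bool :=
  if c ∈ pvAVowels then decide (p ∈ pvAConsonants ∧ p ≠ 'y') else true

theorem pvClass_V (c : Char) : pvClassify c = 'V' ↔ c ∈ pvAVowels := by
  unfold pvClassify pvAVowels
  by_cases h1 : c ∈ ['a', 'e', 'i', 'o', 'u']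
  · simp [h1]
  · rw [if_neg h1]
    split_ifs <;> simp [h1]

theorem pvClass_C (p : Char) : pvClassify p = 'C' ↔ (p ∈ pvAConsonants ∧ p ≠ 'y') := by
  unfold pvClassify pvAConsonants
  by_cases h1 : p ∈ ['a', 'e', 'i', 'o', 'u']
  · rw [if_pos h1]
    simp only [List.mem_cons, List.not_mem_nil, or_false] at h1
    constructor
    · intro h; exact absurd h (by decide)
    · rintro ⟨hm, hy⟩
      rcases h1 with rfl | rfl | rfl | rfl | rfl <;> exact absurd hm (by decide)
  · by_cases h2 : p ∈ ['b','c','d','f','g','h','j','k','l','m','n','p','q','r','s','t','v','w','x','z']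
    · rw [if_neg h1, if_pos h2]
      simp only [List.mem_cons, List.not_mem_nil, or_false] at h2
      constructor
      · intro _
        rcases h2 with rfl|rfl|rfl|rfl|rfl|rfl|rfl|rfl|rfl|rfl|rfl|rfl|rfl|rfl|rfl|rfl|rfl|rfl|rfl|rfl <;>
          exact ⟨by decide, by decide⟩
      · intro _; rfl
    · rw [if_neg h1, if_neg h2]
      constructor
      · intro h; exact absurd h (by decide)
      · rintro ⟨hm, hy⟩
        simp only [List.mem_cons, List.not_mem_nil, or_false] at hm
        rcases hm with rfl|rfl|rfl|rfl|rfl|rfl|rfl|rfl|rfl|rfl|rfl|rfl|rfl|rfl|rfl|rfl|rfl|rfl|rfl|rfl|rfl <;>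
          first | (exact absurd (by decide) h2) | (exact absurd rfl hy)

theorem pvClass_cases (c : Char) :
    pvClassify c = 'V' ∨ pvClassify c = 'C' ∨ pvClassify c = 'X' := by
  unfold pvClassify; split_ifs <;> simp

-- per-pair: A's test equals "the class pair is not a forbidden digram"
theorem pvPair_classes (p c : Char) :
    pvPairOK p c =
      !((pvClassify p == 'V' || pvClassify p == 'X') && (pvClassify c == 'V')) := by
  unfold pvPairOK
  by_cases hc : c ∈ pvAVowels
  · have hcV : pvClassify c = 'V' := (pvClass_V c).mpr hc
    by_cases hp : p ∈ pvAConsonants ∧ p ≠ 'y'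
    · have hpC : pvClassify p = 'C' := (pvClass_C p).mpr hp
      simp [hc, hcV, hpC, hp.1, hp.2]
    · have hpC : pvClassify p ≠ 'C' := fun h => hp ((pvClass_C p).mp h)
      rcases pvClass_cases p with h|h|h
      · simp [hc, hp, hcV, h]
      · exact absurd h hpC
      · simp [hc, hp, hcV, h]
  · have hcV : pvClassify c ≠ 'V' := fun h => hc ((pvClass_V c).mp h)
    have : (pvClassify c == 'V') = false := by simpa using hcV
    simp [hc, this]

-- A's inner loop from index j computes the pairwise test over the remaining adjacent pairs
theorem pvInner_eq_aux : ∀ (n : Nat) (w : List Char) (j : Nat), 1 ≤ j → w.length - j ≤ n →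
    pvAInner w j = ((w.drop (j - 1)).zip (w.drop j)).all (fun pc => pvPairOK pc.1 pc.2) := by
  intro n
  induction n with
  | zero =>
    intro w j hj hn
    have hlen : ¬ j < w.length := by omega
    rw [pvAInner, if_neg hlen]
    rw [List.drop_eq_nil_of_le (show w.length ≤ j by omega), List.zip_nil_right]
    rfl
  | succ n ih =>
    intro w j hj hn
    by_cases hlen : j < w.length
    · have hj1 : j - 1 < w.length := by omega
      have hdrop1 : w.drop (j - 1) = w[j - 1] :: w.drop (j - 1 + 1) := List.drop_eq_getElem_cons hj1
      have hdrop2 : w.drop j = w[j] :: w.drop (j + 1) := List.drop_eq_getElem_cons hlen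
      have hjj : j - 1 + 1 = j := by omega
      have hcast : ((j : Int) - 1) = ((j - 1 : Nat) : Int) := by omega
      have hget1 : PySem.List.pyGetD w ((j - 1 : Nat) : Int) ' ' = w[j - 1] := by
        simp [PySem.List.pyGetD_natCast, List.getD_eq_getElem?_getD, hj1]
      have hget2 : PySem.List.pyGetD w ((j : Nat) : Int) ' ' = w[j] := by
        simp [PySem.List.pyGetD_natCast, List.getD_eq_getElem?_getD, hlen]
      have hrec : pvAInner w (j + 1) =
          ((w.drop j).zip (w.drop (j + 1))).all (fun pc => pvPairOK pc.1 pc.2) := by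
        simpa using ih w (j + 1) (by omega) (by omega)
      have hall : ((w.drop (j - 1)).zip (w.drop j)).all (fun pc => pvPairOK pc.1 pc.2)
          = (pvPairOK w[j - 1] w[j] &&
              ((w.drop j).zip (w.drop (j + 1))).all (fun pc => pvPairOK pc.1 pc.2)) := by
        conv_lhs => rw [hdrop1, hjj, hdrop2]
        rw [hdrop2, List.zip_cons_cons, List.all_cons]
      rw [pvAInner, if_pos hlen, hcast, hget1, hget2, hall, hrec]
      unfold pvPairOK
      by_cases hv : w[j] ∈ pvAVowels
      · by_cases hp : w[j - 1] ∈ pvAConsonants ∧ w[j - 1] ≠ 'y' <;> simp [hv, hp]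
      · simp [hv]
    · rw [pvAInner, if_neg hlen]
      rw [List.drop_eq_nil_of_le (show w.length ≤ j by omega), List.zip_nil_right]
      rfl

theorem pvInner_eq (w : List Char) :
    pvAInner w 1 = (w.zip (w.drop 1)).all (fun pc => pvPairOK pc.1 pc.2) := by
  simpa using pvInner_eq_aux (w.length - 1) w 1 (by omega) (by omega)

-- a two-character infix is exactly a member of the adjacent-pairs list
theorem pvInfix_pair (a b : Char) : ∀ (t : List Char),
    ([a, b] <:+: t ↔ (a, b) ∈ t.zip (t.drop 1)) := by
  intro t
  induction t with
  | nil => simp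
  | cons x rest ih =>
    cases rest with
    | nil =>
      simp only [List.drop_succ_cons, List.drop_nil, List.zip_nil_right, List.not_mem_nil,
        iff_false]
      intro h
      have := h.length_le; simp at this
    | cons y rest2 =>
      rw [List.infix_cons_iff]
      simp only [List.drop_succ_cons, List.drop_zero, List.zip_cons_cons, List.mem_cons]
      rw [ih]
      constructor
      · rintro (hpre | hin)
        · left
          rcases List.cons_prefix_cons.mp hpre with ⟨rfl, hb⟩
          rcases List.cons_prefix_cons.mp hb with ⟨rfl, _⟩
          rfl
        · right; exact hin
      · rintro (heq | hin)
        · left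
          rw [Prod.mk.injEq] at heq
          obtain ⟨rfl, rfl⟩ := heq
          exact List.cons_prefix_cons.mpr ⟨rfl, List.cons_prefix_cons.mpr ⟨rfl, List.nil_prefix⟩⟩
        · right; exact hin

-- zip of adjacent pairs commutes with mapping the classifier
theorem pvZip_map (w : List Char) :
    ((w.map pvClassify).zip ((w.map pvClassify).drop 1))
      = (w.zip (w.drop 1)).map (fun pc => (pvClassify pc.1, pvClassify pc.2)) := by
  rw [← List.map_drop, List.zip_map]
  rfl

-- word-level: A's per-word check equals B's not-bad test on the class string
theorem pvWord_eq (w : List Char) :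
    (if (PySem.List.pyGetD w (0 : Int) ' ') ∈ pvAVowels then true else pvAInner w 1)
      = !(!(PySem.Chars.startswith (w.map pvClassify) ['V']) &&
          (PySem.Chars.isIn ['V', 'V'] (w.map pvClassify) ||
           PySem.Chars.isIn ['X', 'V'] (w.map pvClassify))) := by
  cases w with
  | nil =>
    rw [pvAInner]
    simp [PySem.List.pyGetD, pvAVowels,
      (by decide : PySem.Chars.isIn ['V', 'V'] ([] : List Char) = false),
      (by decide : PySem.Chars.isIn ['X', 'V'] ([] : List Char) = false)]
  | cons c0 rest =>
    rw [PySem.List.pyGetD_zero_cons]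
    by_cases h0 : c0 ∈ pvAVowels
    · have hsw : PySem.Chars.startswith ((c0 :: rest).map pvClassify) ['V'] = true := by
        rw [PySem.Chars.startswith_iff, List.map_cons]
        exact List.cons_prefix_cons.mpr ⟨((pvClass_V c0).mpr h0).symm, List.nil_prefix⟩
      rw [if_pos h0, hsw]
      simp
    · have hsw : PySem.Chars.startswith ((c0 :: rest).map pvClassify) ['V'] = false := by
        rw [← Bool.not_eq_true, PySem.Chars.startswith_iff, List.map_cons]
        intro h
        exact h0 ((pvClass_V c0).mp (List.cons_prefix_cons.mp h).1.symm)
      rw [if_neg h0, hsw, pvInner_eq]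
      set t := (c0 :: rest).map pvClassify with ht
      by_cases hVV : PySem.Chars.isIn ['V', 'V'] t
      · rw [hVV]
        have hmem : ('V', 'V') ∈ t.zip (t.drop 1) :=
          (pvInfix_pair 'V' 'V' t).mp ((PySem.Chars.isIn_iff_infix _ _).mp hVV)
        rw [ht, pvZip_map] at hmem
        obtain ⟨pc, hpc, heq⟩ := List.mem_map.mp hmem
        rw [Prod.mk.injEq] at heq
        have hfalse : pvPairOK pc.1 pc.2 = false := by
          rw [pvPair_classes]
          simp [heq.1, heq.2]
        simp only [Bool.true_or, Bool.and_true, Bool.not_not]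
        rw [List.all_eq_false]
        exact ⟨pc, hpc, by simp [hfalse]⟩
      · by_cases hXV : PySem.Chars.isIn ['X', 'V'] t
        · rw [hXV]
          have hmem : ('X', 'V') ∈ t.zip (t.drop 1) :=
            (pvInfix_pair 'X' 'V' t).mp ((PySem.Chars.isIn_iff_infix _ _).mp hXV)
          rw [ht, pvZip_map] at hmem
          obtain ⟨pc, hpc, heq⟩ := List.mem_map.mp hmem
          rw [Prod.mk.injEq] at heq
          have hfalse : pvPairOK pc.1 pc.2 = false := by
            rw [pvPair_classes]
            simp [heq.1, heq.2]
          simp only [Bool.or_true, Bool.and_true, Bool.not_not]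
          rw [List.all_eq_false]
          exact ⟨pc, hpc, by simp [hfalse]⟩
        · rw [Bool.not_eq_true] at hVV hXV
          rw [hVV, hXV]
          simp only [Bool.or_self, Bool.and_false, Bool.not_false]
          rw [List.all_eq_true]
          intro pc hpc
          rw [pvPair_classes]
          have hnVV : ('V', 'V') ∉ t.zip (t.drop 1) := fun h =>
            (PySem.Chars.isIn_eq_false_iff _ _).mp hVV ((pvInfix_pair 'V' 'V' t).mpr h)
          have hnXV : ('X', 'V') ∉ t.zip (t.drop 1) := fun h =>
            (PySem.Chars.isIn_eq_false_iff _ _).mp hXV ((pvInfix_pair 'X' 'V' t).mpr h)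
          rw [ht, pvZip_map] at hnVV hnXV
          have h1 : ¬ (pvClassify pc.1 = 'V' ∧ pvClassify pc.2 = 'V') := by
            intro ⟨ha, hb⟩
            exact hnVV (List.mem_map.mpr ⟨pc, hpc, by simp [ha, hb]⟩)
          have h2 : ¬ (pvClassify pc.1 = 'X' ∧ pvClassify pc.2 = 'V') := by
            intro ⟨ha, hb⟩
            exact hnXV (List.mem_map.mpr ⟨pc, hpc, by simp [ha, hb]⟩)
          by_cases hb : pvClassify pc.2 = 'V'
          · rcases pvClass_cases pc.1 with h|h|h
            · exact absurd ⟨h, hb⟩ h1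
            · simp [h, hb]
            · exact absurd ⟨h, hb⟩ h2
          · simp [hb]

-- outer-loop level: A's loop equals B's loop over the classified words
theorem pvOuter_eq (ws : List (List Char)) :
    pvAOuter ws = pvBLoop (ws.map (fun w => w.map pvClassify)) := by
  induction ws with
  | nil => rfl
  | cons w ws ih =>
    rw [pvAOuter, List.map_cons, pvBLoop]
    have h := pvWord_eq w
    by_cases h0 : (PySem.List.pyGetD w (0 : Int) ' ') ∈ pvAVowels
    · rw [if_pos h0] at h ⊢
      rw [if_neg (by intro hb; rw [hb] at h; simp at h)]
      exact ih
    · rw [if_neg h0] at h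
      by_cases hi : pvAInner w 1
      · rw [hi] at h
        rw [if_neg h0, if_pos hi, if_neg (by intro hb; rw [hb] at h; simp at h)]
        exact ih
      · rw [Bool.not_eq_true] at hi
        rw [hi] at h
        rw [if_neg h0, if_neg (by simp [hi]),
          if_pos (by cases hb : (!(PySem.Chars.startswith (w.map pvClassify) ['V']) && (PySem.Chars.isIn ['V', 'V'] (w.map pvClassify) || PySem.Chars.isIn ['X', 'V'] (w.map pvClassify))) <;> rw [hb] at h <;> simp_all)]

-- ===== VERDICT (by name: the statement is the Claim_ definition above) =====
theorem check_vowels_spec : Claim_equal_check_vowels := by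
  intro s _
  unfold Spec_check_vowels check_vowels check_vowels_alt
  exact pvOuter_eq _
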